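-- pv_equiv track=rewrite | github.com/APrinceGPT/intellicket | CSDAIv2/analyzers/ds_agent_log_analyzer.py | _find_common_words
-- ===== SOURCE A (Python) =====
-- from typing import Dict, List
--
-- def _find_common_words(cluster_messages: List[Dict]) -> List[str]:
--     """Find common words in cluster messages"""
--     from collections import Counter
--
--     all_words = []
--     for msg in cluster_messages:
--         words = msg['message'].split()
--         # Filter out very common words
--         filtered_words = [w for w in words if len(w) > 3 and w not in ['the', 'and', 'for', 'with', 'from']]
--         all_words.extend(filtered_words)
--
--     word_counts = Counter(all_words)
--     return [word for word, count in word_counts.most_common(10) if count > 1]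
-- ===== SOURCE B (Python) =====
-- from typing import Dict, List
--
-- def _find_common_words(cluster_messages: List[Dict]) -> List[str]:
--     """Find common words via bucket (pigeonhole) selection over distinct counts:
--     repeatedly emit the bucket of the largest remaining count -- no sort, no heap."""
--     counts = {}
--     for msg in cluster_messages:
--         for w in msg['message'].split():
--             if len(w) > 3 and w not in ('the', 'and', 'for', 'with', 'from'):
--                 counts[w] = counts.get(w, 0) + 1
--     cs = []  # distinct counts > 1 (count-1 words can never be returned)
--     for n in counts.values():
--         if n > 1 and n not in cs:
--             cs.append(n)
--     result = []
--     while cs and len(result) < 10: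
--         c = max(cs)
--         cs.remove(c)
--         for w, n in counts.items():
--             if n == c and len(result) < 10:
--                 result.append(w)
--     return result
-- ===== Notes on version B (the rewrite author's own statement) =====
-- stated objective: alternative
-- what changed: B replaces Counter.most_common(10)'s heap-based top-k over all counted items by bucket (pigeonhole) selection: it counts words in one pass, collects the distinct counts greater than 1, and repeatedly extracts the largest remaining count and emits that count's bucket of words in first-occurrence order until 10 slots are consumed - no sort and no heap over the items.
import Mathlib
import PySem

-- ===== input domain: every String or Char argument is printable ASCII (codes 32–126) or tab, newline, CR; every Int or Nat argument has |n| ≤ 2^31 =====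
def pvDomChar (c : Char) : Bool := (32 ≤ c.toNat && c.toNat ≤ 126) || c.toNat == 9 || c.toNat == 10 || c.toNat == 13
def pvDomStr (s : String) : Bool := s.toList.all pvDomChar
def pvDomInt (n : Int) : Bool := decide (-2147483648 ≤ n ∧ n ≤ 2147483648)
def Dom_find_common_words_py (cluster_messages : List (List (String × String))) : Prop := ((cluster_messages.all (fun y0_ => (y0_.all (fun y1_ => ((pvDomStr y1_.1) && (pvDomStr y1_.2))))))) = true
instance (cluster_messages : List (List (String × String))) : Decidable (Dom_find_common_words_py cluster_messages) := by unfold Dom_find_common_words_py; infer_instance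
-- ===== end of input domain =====

-- B replaces Counter.most_common(10) (heap top-k over all counted items) by bucket (pigeonhole)
-- selection: it collects the distinct counts > 1 and repeatedly emits the bucket of the largest
-- remaining count, in first-occurrence order, until 10 slots are used — no sort, no heap.

-- ===== PORT A =====
-- the filter of the list comprehension: len(w) > 3 and w not in ['the','and','for','with','from']
def pvKeep (w : String) : Bool :=
  decide (3 < PySem.Str.len w) && !(["the", "and", "for", "with", "from"].contains w)

-- msg['message'] (KeyError when absent is excluded by Pre_; outside Pre_ the port reads "")
def pvMsg (msg : List (String × String)) : String :=
  ((PySem.Dict.ofList msg).get? "message").getD ""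

def find_common_words_py (cluster_messages : List (List (String × String))) : List String :=
  let all_words := cluster_messages.foldl
    (fun acc msg => acc ++ (PySem.Str.split₀ (pvMsg msg)).filter pvKeep) []
  let word_counts := PySem.Dict.counter all_words
  -- most_common(10) = heapq.nlargest(10, items, key=count) = sorted(items, key=count, reverse=True)[:10]
  let mc := (PySem.List.sorted word_counts.items (fun p => p.2) true).take 10
  (mc.filter (fun p => decide (1 < p.2))).map (·.1)

-- ===== PORT B =====
-- the 'while cs and len(result) < 10' loop; fuel = len(cs) (cs loses exactly one count per pass)
def pvBloop (items : List (String × Int)) : Nat → List Int → List String → List String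
  | 0, _, res => res
  | fuel+1, cs, res =>
    if cs.isEmpty || decide (10 ≤ res.length) then res
    else
      let c := (PySem.List.max? cs (fun x => x)).getD 0
      let cs' := (PySem.List.remove? cs c).getD []
      let res' := items.foldl
        (fun r p => if p.2 == c && decide (r.length < 10) then r ++ [p.1] else r) res
      pvBloop items fuel cs' res'

def find_common_words_py_alt (cluster_messages : List (List (String × String))) : List String :=
  let counts := cluster_messages.foldl
    (fun d msg => (PySem.Str.split₀ (pvMsg msg)).foldl
      (fun d w => if pvKeep w then d.insert w (d.getD w 0 + 1) else d) d)
    PySem.Dict.empty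
  let cs := counts.values.foldl
    (fun acc n => if decide (1 < n) && !(acc.contains n) then acc ++ [n] else acc) []
  pvBloop counts.items cs.length cs []

-- ===== PRECONDITION & SPEC =====
-- Pre_: every message dict must contain the key 'message' (Python raises KeyError otherwise).
def Pre_find_common_words_py (cluster_messages : List (List (String × String))) : Prop :=
  (cluster_messages.all (fun msg => (PySem.Dict.ofList msg).contains "message")) = true
instance (cluster_messages : List (List (String × String))) : Decidable (Pre_find_common_words_py cluster_messages) := by unfold Pre_find_common_words_py; infer_instance
def pvWitness_find_common_words_py : (List (List (String × String))) :=
  [[("message", "alpha beta alpha")], [("message", "beta gamma")]]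

def Spec_find_common_words_py (cluster_messages : List (List (String × String))) (out : List String) : Prop := out = find_common_words_py_alt cluster_messages
instance (cluster_messages : List (List (String × String))) (out : List String) : Decidable (Spec_find_common_words_py cluster_messages out) := by unfold Spec_find_common_words_py; infer_instance

-- ===== CLAIM (what is proved, stated in full; the proofs are below) =====
def Claim_equal_find_common_words_py : Prop := ∀ (cluster_messages : List (List (String × String))), Dom_find_common_words_py cluster_messages → Pre_find_common_words_py cluster_messages → Spec_find_common_words_py cluster_messages (find_common_words_py cluster_messages)

-- ===== LEMMAS AND PROOFS =====

-- B's nested counting loop builds exactly Counter(all_words) of A.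
theorem counts_eq (cms : List (List (String × String))) :
    cms.foldl (fun d msg => (PySem.Str.split₀ (pvMsg msg)).foldl
        (fun d w => if pvKeep w then d.insert w (d.getD w 0 + 1) else d) d)
      PySem.Dict.empty
    = PySem.Dict.counter
        (cms.foldl (fun acc msg => acc ++ (PySem.Str.split₀ (pvMsg msg)).filter pvKeep) []) := by
  rw [PySem.List.foldl_append_eq_flatMap, ← PySem.Dict.foldl_insert_getD_add_one_eq_counter,
    List.nil_append, List.foldl_flatMap]
  refine List.foldl_ext _ _ _ (fun d msg _ => ?_)
  rw [List.foldl_filter]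

-- insertBy passes over a block whose every element triggers insertion
theorem insertBy_append_left {α : Type} (bef : α → α → Bool) (x : α) (A B : List α)
    (h : ∀ b ∈ B, bef x b = true) :
    PySem.List.insertBy bef x (A ++ B) = PySem.List.insertBy bef x A ++ B := by
  induction A with
  | nil =>
    cases B with
    | nil => rfl
    | cons b B' => simp [PySem.List.insertBy, h b (by simp)]
  | cons a A' ih =>
    simp only [List.cons_append, PySem.List.insertBy]
    by_cases hx : bef x a = true
    · simp [hx]
    · simp [hx, ih]

-- insertBy passes over a block in which nothing triggers insertion
theorem insertBy_append_right {α : Type} (bef : α → α → Bool) (x : α) (A B : List α)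
    (h : ∀ a ∈ A, bef x a = false) :
    PySem.List.insertBy bef x (A ++ B) = A ++ PySem.List.insertBy bef x B := by
  induction A with
  | nil => rfl
  | cons a A' ih =>
    simp only [List.cons_append, PySem.List.insertBy, h a (by simp)]
    simp only [Bool.false_eq_true, if_false, List.cons_inj_right]
    exact ih (fun a ha => h a (by simp [ha]))

theorem sorted_rev_snoc {α : Type} (xs : List α) (x : α) (key : α → Int) :
    PySem.List.sorted (xs ++ [x]) key true
      = PySem.List.insertBy (fun a b => decide (key b < key a)) x (PySem.List.sorted xs key true) := by
  rw [PySem.List.sorted_rev_eq_foldl_insertBy, PySem.List.sorted_rev_eq_foldl_insertBy,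
    List.foldl_append]
  rfl

-- stable descending sort splits at any key threshold predicate
theorem sorted_rev_partition {α : Type} (key : α → Int) (q : α → Bool) (xs : List α)
    (h : ∀ x y, q x = true → q y = false → key y < key x) :
    PySem.List.sorted xs key true
      = PySem.List.sorted (xs.filter q) key true
        ++ PySem.List.sorted (xs.filter (fun x => !q x)) key true := by
  induction xs using List.reverseRecOn with
  | nil => rfl
  | append_singleton xs x ih =>
    rw [sorted_rev_snoc, ih, List.filter_append, List.filter_append]
    by_cases hq : q x = true
    · rw [insertBy_append_left _ _ _ _ ?side]
      · simp [hq, sorted_rev_snoc]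
      case side =>
        intro b hb
        rw [PySem.List.mem_sorted, List.mem_filter] at hb
        simp only [decide_eq_true_eq]
        exact h x b hq (by simpa using hb.2)
    · rw [insertBy_append_right _ _ _ _ ?side]
      · simp [hq, sorted_rev_snoc]
      case side =>
        intro a ha
        rw [PySem.List.mem_sorted, List.mem_filter] at ha
        simp only [decide_eq_false_iff_not, not_lt]
        exact le_of_lt (h a x ha.2 (by simpa using hq))

-- stable descending sort = concatenation of equal-key buckets over a strictly descending key list
theorem sorted_rev_buckets {α : Type} (key : α → Int) (ds : List Int) :
    ∀ (items : List α), ds.Pairwise (fun a b => b < a) → (∀ p ∈ items, key p ∈ ds) →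
    PySem.List.sorted items key true
      = ds.flatMap (fun c => items.filter (fun p => key p == c)) := by
  induction ds with
  | nil =>
    intro items _ hall
    have : items = [] := by
      cases items with
      | nil => rfl
      | cons p t => exact absurd (hall p (by simp)) (by simp)
    rw [this]
    rfl
  | cons c ds' ih =>
    intro items hsort hall
    have hlt : ∀ d ∈ ds', d < c := fun d hd => (List.pairwise_cons.mp hsort).1 d hd
    have hle : ∀ p ∈ items, key p ≤ c := by
      intro p hp
      rcases (by simpa using hall p hp : key p = c ∨ key p ∈ ds') with h | h
      · omega
      · exact le_of_lt (hlt _ h)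
    rw [sorted_rev_partition key (fun p => decide (c ≤ key p)) items ?hpart]
    case hpart =>
      intro x y hx hy
      simp only [decide_eq_true_eq] at hx
      simp only [decide_eq_false_iff_not, not_le] at hy
      omega
    have hfq : items.filter (fun p => decide (c ≤ key p)) = items.filter (fun p => key p == c) := by
      refine List.filter_congr (fun p hp => ?_)
      have := hle p hp
      by_cases hc : key p = c
      · simp [hc]
      · have : ¬ c ≤ key p := by omega
        simp [this, hc]
    have hbucket : PySem.List.sorted (items.filter (fun p => key p == c)) key true
        = items.filter (fun p => key p == c) := by
      refine PySem.List.sorted_rev_eq_self_of_pairwise _ _ ?_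
      refine List.pairwise_of_forall_mem_list (fun a ha b hb => ?_)
      rw [List.mem_filter] at ha hb
      have ha2 : key a = c := by simpa using ha.2
      have hb2 : key b = c := by simpa using hb.2
      omega
    have hrest : PySem.List.sorted (items.filter (fun p => !(decide (c ≤ key p)))) key true
        = ds'.flatMap (fun c' => items.filter (fun p => key p == c')) := by
      rw [ih (items.filter (fun p => !(decide (c ≤ key p)))) (List.pairwise_cons.mp hsort).2 ?hall']
      case hall' =>
        intro p hp
        rw [List.mem_filter] at hp
        have h1 := hall p hp.1
        have h2 : ¬ c ≤ key p := by simpa using hp.2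
        rcases (by simpa using h1 : key p = c ∨ key p ∈ ds') with h | h
        · omega
        · exact h
      refine List.flatMap_congr (fun c' hc' => ?_)
      rw [List.filter_filter]
      refine List.filter_congr (fun p hp => ?_)
      by_cases h : key p = c'
      · have h2 : ¬ c ≤ key p := by have := hlt c' hc'; omega
        rw [h] at h2
        simp [h, h2]
      · simp [h]
    rw [hfq, hbucket, hrest, List.flatMap_cons]

-- a strictly descending sorted view of a duplicate-free list: max first, then the rest
theorem sorted_desc_max_cons (cs : List Int) (m : Int) (hnd : cs.Nodup)
    (hm : PySem.List.max? cs (fun x => x) = some m) :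
    PySem.List.sorted cs (fun x => x) true = m :: PySem.List.sorted (cs.erase m) (fun x => x) true := by
  have hmem : m ∈ cs := PySem.List.max?_mem hm
  have hmax : ∀ y ∈ cs, y ≤ m := by
    intro y hy; simpa using PySem.List.max?_isMax hm y hy
  refine PySem.List.sorted_rev_eq_of_perm_of_pairwise_gt _ _ _ ?perm ?pw
  case perm =>
    refine List.Perm.trans ?_ (List.perm_cons_erase hmem).symm
    exact List.Perm.cons m (PySem.List.sorted_perm _ _ _)
  case pw =>
    rw [List.pairwise_cons]
    constructor
    · intro y hy
      rw [PySem.List.mem_sorted] at hy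
      have hyc : y ∈ cs := List.mem_of_mem_erase hy
      have hne : y ≠ m := ((List.Nodup.mem_erase_iff hnd).mp hy).1
      have := hmax y hyc
      omega
    · have hpw := PySem.List.sorted_pairwise_rev (cs.erase m) (fun x => x)
      have hndup : (PySem.List.sorted (cs.erase m) (fun x => x) true).Nodup :=
        (PySem.List.sorted_perm _ _ _).nodup_iff.mpr (hnd.erase m)
      have := List.Pairwise.and hpw hndup
      exact this.imp (fun {a b} h => lt_of_le_of_ne h.1 (Ne.symm h.2))

-- the inner 'for w, n in counts.items(): if n == c and len(result) < 10: append'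
theorem inner_loop_eq (c : Int) :
    ∀ (items : List (String × Int)) (res : List String),
    items.foldl (fun r p => if p.2 == c && decide (r.length < 10) then r ++ [p.1] else r) res
      = res ++ ((items.filter (fun p => p.2 == c)).map (·.1)).take (10 - res.length) := by
  intro items
  induction items with
  | nil => simp
  | cons p t ih =>
    intro res
    rw [List.foldl_cons]
    by_cases hc : p.2 = c
    · by_cases hlen : res.length < 10
      · rw [if_pos (by simp [hc, hlen]), ih]
        have h10 : 10 - res.length = (10 - (res.length + 1)) + 1 := by omega
        simp [hc, h10, List.filter_cons]
      · rw [if_neg (by simp [hlen]), ih]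
        have h10 : 10 - res.length = 0 := by omega
        have h10' : 10 - (res.length + 1) = 0 := by omega
        simp [hc, h10, h10', List.filter_cons]
    · rw [if_neg (by simp [hc]), ih]
      simp [hc, List.filter_cons]

-- the 'distinct counts > 1, first-occurrence order' accumulator loop
theorem cs_spec :
    ∀ (l : List Int) (acc : List Int), acc.Nodup →
    (l.foldl (fun acc n => if decide (1 < n) && !(acc.contains n) then acc ++ [n] else acc) acc).Nodup
    ∧ (∀ x, x ∈ l.foldl (fun acc n => if decide (1 < n) && !(acc.contains n) then acc ++ [n] else acc) acc
        ↔ x ∈ acc ∨ (x ∈ l ∧ 1 < x)) := by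
  intro l
  induction l with
  | nil => intro acc h; simpa using h
  | cons n t ih =>
    intro acc hacc
    by_cases h1 : 1 < n
    · by_cases h2 : n ∈ acc
      · have hb : (decide (1 < n) && !(acc.contains n)) = false := by simp [h1, h2]
        have := ih acc hacc
        simp only [List.foldl_cons, hb, Bool.false_eq_true, if_false]
        refine ⟨this.1, fun x => ?_⟩
        rw [(this.2 x)]
        constructor
        · rintro (h | h)
          · exact Or.inl h
          · exact Or.inr ⟨List.mem_cons_of_mem _ h.1, h.2⟩
        · rintro (h | ⟨hx, hx1⟩)
          · exact Or.inl h
          · rcases List.mem_cons.mp hx with rfl | hx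
            · exact Or.inl h2
            · exact Or.inr ⟨hx, hx1⟩
      · have hb : (decide (1 < n) && !(acc.contains n)) = true := by simp [h1, h2]
        have hnd : (acc ++ [n]).Nodup := by
          rw [List.nodup_append]
          refine ⟨hacc, List.nodup_singleton n, ?_⟩
          intro a ha b hb he
          rw [List.mem_singleton] at hb
          exact h2 ((he.trans hb) ▸ ha)
        have := ih (acc ++ [n]) hnd
        simp only [List.foldl_cons, hb, if_true]
        refine ⟨this.1, fun x => ?_⟩
        rw [(this.2 x)]
        constructor
        · rintro (h | h)
          · rcases List.mem_append.mp h with h | h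
            · exact Or.inl h
            · simp only [List.mem_singleton] at h
              exact Or.inr ⟨by simp [h], by omega⟩
          · exact Or.inr ⟨List.mem_cons_of_mem _ h.1, h.2⟩
        · rintro (h | ⟨hx, hx1⟩)
          · exact Or.inl (List.mem_append.mpr (Or.inl h))
          · rcases List.mem_cons.mp hx with rfl | hx
            · exact Or.inl (by simp)
            · exact Or.inr ⟨hx, hx1⟩
    · have hb : (decide (1 < n) && !(acc.contains n)) = false := by simp [h1]
      have := ih acc hacc
      simp only [List.foldl_cons, hb, Bool.false_eq_true, if_false]
      refine ⟨this.1, fun x => ?_⟩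
      rw [(this.2 x)]
      constructor
      · rintro (h | h)
        · exact Or.inl h
        · exact Or.inr ⟨List.mem_cons_of_mem _ h.1, h.2⟩
      · rintro (h | ⟨hx, hx1⟩)
        · exact Or.inl h
        · rcases List.mem_cons.mp hx with rfl | hx
          · omega
          · exact Or.inr ⟨hx, hx1⟩

-- the while loop emits, in descending count order, each count's bucket, capped at 10 slots
theorem bloop_eq (items : List (String × Int)) :
    ∀ (fuel : Nat) (cs : List Int) (res : List String), cs.length = fuel → cs.Nodup →
    pvBloop items fuel cs res
      = res ++ ((PySem.List.sorted cs (fun x => x) true).flatMap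
          (fun c => (items.filter (fun p => p.2 == c)).map (·.1))).take (10 - res.length) := by
  intro fuel
  induction fuel with
  | zero =>
    intro cs res hlen _
    rw [List.length_eq_zero_iff] at hlen
    subst hlen
    simp [pvBloop]
  | succ n ih =>
    intro cs res hlen hnd
    have hcs : cs ≠ [] := by intro h; subst h; simp at hlen
    by_cases hres : 10 ≤ res.length
    · have : 10 - res.length = 0 := by omega
      simp [pvBloop, hres, this]
    · obtain ⟨m, hm⟩ : ∃ m, PySem.List.max? cs (fun x => x) = some m := by
        cases h : PySem.List.max? cs (fun x => x) with
        | none => exact absurd ((PySem.List.max?_eq_none_iff _ _).mp h) hcs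
        | some m => exact ⟨m, rfl⟩
      have hmem : m ∈ cs := PySem.List.max?_mem hm
      have hrm : PySem.List.remove? cs m = some (cs.erase m) :=
        PySem.List.remove?_eq_some_erase cs m hmem
      have hlen' : (cs.erase m).length = n := by
        have := List.length_erase_of_mem hmem
        omega
      have hstep : pvBloop items (n+1) cs res
          = pvBloop items n (cs.erase m)
              (items.foldl (fun r p => if p.2 == m && decide (r.length < 10) then r ++ [p.1] else r) res) := by
        simp [pvBloop, hcs, hres, hm, hrm]
      rw [hstep, inner_loop_eq, ih _ _ hlen' (hnd.erase m),
        sorted_desc_max_cons cs m hnd hm, List.flatMap_cons, List.take_append, List.append_assoc]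
      congr 2
      have : (((items.filter (fun p => p.2 == m)).map (·.1)).take (10 - res.length)).length
          = min ((items.filter (fun p => p.2 == m)).map (·.1)).length (10 - res.length) := by
        simp [List.length_take, Nat.min_comm]
      rw [List.length_append, this]
      congr 1
      omega

-- taking then filtering, when a true-block precedes a false-block
theorem take_filter_blocks {α : Type} (p : α → Bool) (l1 l2 : List α) (k : Nat)
    (h1 : ∀ x ∈ l1, p x = true) (h2 : ∀ x ∈ l2, p x = false) :
    ((l1 ++ l2).take k).filter p = l1.take k := by
  rw [List.take_append, List.filter_append]
  rw [List.filter_eq_self.mpr (fun x hx => h1 x (List.mem_of_mem_take hx)),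
    List.filter_eq_nil_iff.mpr (fun x hx => by simp [h2 x (List.mem_of_mem_take hx)]),
    List.append_nil]

-- ===== VERDICT (by name: the statement is the Claim_ definition above) =====
theorem find_common_words_py_spec : Claim_equal_find_common_words_py := by
  intro cms _ _
  show find_common_words_py cms = find_common_words_py_alt cms
  simp only [find_common_words_py, find_common_words_py_alt]
  rw [counts_eq]
  set counts := PySem.Dict.counter
      (cms.foldl (fun acc msg => acc ++ (PySem.Str.split₀ (pvMsg msg)).filter pvKeep) []) with hc
  set items := counts.items with hitems
  -- the distinct-counts loop
  have hvals : counts.values = items.map (·.2) := rfl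
  set cs := counts.values.foldl
      (fun acc n => if decide (1 < n) && !(acc.contains n) then acc ++ [n] else acc) [] with hcsdef
  have hcspec := cs_spec counts.values [] (by simp)
  have hcsnd : cs.Nodup := hcspec.1
  have hcsmem : ∀ x, x ∈ cs ↔ x ∈ counts.values ∧ 1 < x := by
    intro x
    rw [hcsdef, (hcspec.2 x)]
    simp
  set ds := PySem.List.sorted cs (fun x => x) true with hds
  have hdsgt : ds.Pairwise (fun a b => b < a) := by
    have hpw := PySem.List.sorted_pairwise_rev cs (fun x => x)
    have hndup : ds.Nodup := (PySem.List.sorted_perm _ _ _).nodup_iff.mpr hcsnd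
    exact (List.Pairwise.and hpw hndup).imp (fun {a b} h => lt_of_le_of_ne h.1 (Ne.symm h.2))
  have hdsmem : ∀ x, x ∈ ds ↔ x ∈ counts.values ∧ 1 < x := by
    intro x; rw [hds, PySem.List.mem_sorted]; exact hcsmem x
  -- split the sorted items at count > 1
  have hpart := sorted_rev_partition (fun p : String × Int => p.2)
      (fun p => decide (1 < p.2)) items
      (by intro x y hx hy
          simp only [decide_eq_true_eq] at hx
          simp only [decide_eq_false_iff_not, not_lt] at hy
          show y.2 < x.2
          omega)
  set hi := items.filter (fun p => decide (1 < p.2)) with hhi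
  -- buckets of the high part
  have hbuckets : PySem.List.sorted hi (fun p : String × Int => p.2) true
      = ds.flatMap (fun c => hi.filter (fun p => p.2 == c)) := by
    refine sorted_rev_buckets _ ds hi hdsgt ?_
    intro p hp
    rw [hhi, List.mem_filter] at hp
    rw [hdsmem]
    refine ⟨?_, by simpa using hp.2⟩
    rw [hvals]
    exact List.mem_map.mpr ⟨p, hp.1, rfl⟩
  -- bucket over hi = bucket over items, for every c in ds
  have hbeq : ∀ c ∈ ds, hi.filter (fun p => p.2 == c) = items.filter (fun p => p.2 == c) := by
    intro c hcds
    have hc1 : 1 < c := ((hdsmem c).mp hcds).2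
    rw [hhi, List.filter_filter]
    refine List.filter_congr (fun p hp => ?_)
    by_cases h : p.2 = c
    · simp [h]; omega
    · simp [h]
  -- A's pipeline
  rw [hpart]
  rw [take_filter_blocks _ _ _ _ ?h1 ?h2]
  case h1 =>
    intro x hx
    rw [PySem.List.mem_sorted, hhi, List.mem_filter] at hx
    exact hx.2
  case h2 =>
    intro x hx
    rw [PySem.List.mem_sorted, List.mem_filter] at hx
    simpa using hx.2
  -- B's pipeline
  rw [bloop_eq items cs.length cs [] rfl hcsnd]
  simp only [List.nil_append, List.length_nil, Nat.sub_zero, ← hds]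
  rw [hbuckets, List.map_take, List.map_flatMap]
  congr 1
  exact List.flatMap_congr (fun c hcds => by rw [hbeq c hcds])
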